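-- pv_equiv track=rewrite | github.com/dharmatech/jonesforth-steps | step-9002-interpret-execute-macro/scripts/trace-headings.py | split_frames
-- ===== SOURCE A (Python) =====
-- DELIM_LINE = "--------------------"
--
-- def split_frames(content_lines: list[str]) -> list[list[str]]:
--     frames: list[list[str]] = []
--     current: list[str] = []
--
--     for line in content_lines:
--         if line.strip() == DELIM_LINE and current:
--             frames.append(current)
--             current = [line]
--         else:
--             current.append(line)
--
--     if current:
--         frames.append(current)
--
--     return frames
-- ===== SOURCE B (Python) =====
-- DELIM_LINE = "--------------------"
--
--
-- def split_frames(content_lines: list[str]) -> list[list[str]]: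
--     frames: list[list[str]] = []
--     n = len(content_lines)
--     i = 0
--     while i < n:
--         j = i + 1
--         while j < n and content_lines[j].strip() != DELIM_LINE:
--             j += 1
--         frames.append(content_lines[i:j])
--         i = j
--     return frames
-- ===== Notes on version B (the rewrite author's own statement) =====
-- stated objective: alternative
-- what changed: B replaces A's accumulator fold (growing a 'current' frame line by line and flushing it at delimiters) by an index-scan decomposition: for each frame it scans forward from position i+1 to the next delimiter index j and emits the slice content_lines[i:j], advancing i to j.
import Mathlib
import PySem

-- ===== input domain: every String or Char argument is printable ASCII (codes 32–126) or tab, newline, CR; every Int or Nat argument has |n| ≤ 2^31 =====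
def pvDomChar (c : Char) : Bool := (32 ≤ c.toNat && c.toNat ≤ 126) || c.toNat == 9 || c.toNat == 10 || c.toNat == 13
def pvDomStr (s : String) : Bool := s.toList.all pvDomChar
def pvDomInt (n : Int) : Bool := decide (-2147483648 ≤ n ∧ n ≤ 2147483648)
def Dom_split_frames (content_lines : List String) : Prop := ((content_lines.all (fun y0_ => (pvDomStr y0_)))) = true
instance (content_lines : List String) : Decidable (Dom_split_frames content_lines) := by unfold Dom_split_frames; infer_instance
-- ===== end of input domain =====

-- B replaces A's accumulator fold by an index-scan decomposition (find next delimiter index, slice); same behaviour, same O(n) cost.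


-- module constant DELIM_LINE
def pvDELIM : String := "--------------------"

-- ===== PORT A =====
-- literal port of A: fold over the lines with state (frames, current), flush 'current' at a delimiter
def split_frames (content_lines : List String) : List (List String) :=
  let st := content_lines.foldl
    (fun (st : List (List String) × List String) line =>
      if PySem.Str.strip line = pvDELIM ∧ st.2 ≠ [] then
        (st.1 ++ [st.2], [line])
      else
        (st.1, st.2 ++ [line]))
    ([], [])
  if st.2 ≠ [] then st.1 ++ [st.2] else st.1

-- ===== PORT B =====
-- inner while loop: advance j while j < n and content_lines[j].strip() != DELIM_LINE
def pvScan (cl : List String) (n j : Int) : Int :=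
  if _h : j < n then
    if PySem.Str.strip (PySem.List.pyGetD cl j "") ≠ pvDELIM then
      pvScan cl n (j + 1)
    else j
  else j
termination_by (n - j).toNat
decreasing_by omega

-- outer while loop: emit the slice content_lines[i:j] and continue at i = j
def pvScan_ge (cl : List String) (n j : Int) : j ≤ pvScan cl n j := by
  fun_induction pvScan cl n j with
  | case1 j h hd ih => omega
  | case2 j h hd => omega
  | case3 j h => omega

def pvOuter (cl : List String) (n i : Int) : List (List String) :=
  if _h : i < n then
    let j := pvScan cl n (i + 1)
    PySem.List.slice cl (some i) (some j) :: pvOuter cl n j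
  else []
termination_by (n - i).toNat
decreasing_by have := pvScan_ge cl n (i + 1); omega

def split_frames_alt (content_lines : List String) : List (List String) :=
  pvOuter content_lines (content_lines.length : Int) 0

-- ===== PRECONDITION & SPEC =====
def Spec_split_frames (content_lines : List String) (out : List (List String)) : Prop := out = split_frames_alt content_lines
instance (content_lines : List String) (out : List (List String)) : Decidable (Spec_split_frames content_lines out) := by unfold Spec_split_frames; infer_instance

-- ===== CLAIM (what is proved, stated in full; the proofs are below) =====
def Claim_equal_split_frames : Prop := ∀ (content_lines : List String), Dom_split_frames content_lines → Spec_split_frames content_lines (split_frames content_lines)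

-- ===== LEMMAS AND PROOFS =====

-- 'not a delimiter line' as a Bool predicate
def pvNd (s : String) : Bool := !(PySem.Str.strip s == pvDELIM)

-- the structural splitting both programs compute
def pvSalt : List String → List (List String)
  | [] => []
  | h :: t =>
    (h :: t.takeWhile pvNd) :: pvSalt (t.dropWhile pvNd)
termination_by l => l.length
decreasing_by
  simp only [List.length_cons]
  exact Nat.lt_succ_of_le (List.dropWhile_suffix pvNd).length_le

theorem pvSalt_nil : pvSalt [] = [] := by rw [pvSalt]

theorem pvSalt_cons (h : String) (t : List String) :
    pvSalt (h :: t) = (h :: t.takeWhile pvNd) :: pvSalt (t.dropWhile pvNd) := by rw [pvSalt]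

-- A's fold step and finisher, named for the proofs
def pvStep (st : List (List String) × List String) (line : String) : List (List String) × List String :=
  if PySem.Str.strip line = pvDELIM ∧ st.2 ≠ [] then (st.1 ++ [st.2], [line]) else (st.1, st.2 ++ [line])

def pvFinish (st : List (List String) × List String) : List (List String) :=
  if st.2 ≠ [] then st.1 ++ [st.2] else st.1

-- A's fold, started with a nonempty 'current', produces the structural splitting
theorem pvA_inv (ls : List String) : ∀ (frames : List (List String)) (cur : List String), cur ≠ [] →
    pvFinish (ls.foldl pvStep (frames, cur))
      = frames ++ (cur ++ ls.takeWhile pvNd) :: pvSalt (ls.dropWhile pvNd) := by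
  induction ls with
  | nil => intro frames cur hc; simp [pvFinish, pvSalt_nil, hc]
  | cons l ls ih =>
    intro frames cur hc
    rw [List.foldl_cons]
    by_cases hd : PySem.Str.strip l = pvDELIM
    · have hnd : pvNd l = false := by simp [pvNd, hd]
      rw [show pvStep (frames, cur) l = (frames ++ [cur], [l]) from by simp [pvStep, hd, hc]]
      rw [ih (frames ++ [cur]) [l] (by simp)]
      simp only [List.takeWhile_cons, List.dropWhile_cons, hnd, Bool.false_eq_true, if_false]
      rw [pvSalt_cons]
      simp
    · have hnd : pvNd l = true := by simp [pvNd, hd]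
      rw [show pvStep (frames, cur) l = (frames, cur ++ [l]) from by simp [pvStep, hd]]
      rw [ih frames (cur ++ [l]) (by simp)]
      simp [hnd]

theorem pvA_eq_salt (cl : List String) : split_frames cl = pvSalt cl := by
  have hrw : split_frames cl = pvFinish (cl.foldl pvStep ([], [])) := rfl
  rw [hrw]
  cases cl with
  | nil => simp [pvFinish, pvSalt]
  | cons l ls =>
    rw [List.foldl_cons]
    rw [show pvStep ([], []) l = ([], [l]) from by simp [pvStep]]
    rw [pvA_inv ls [] [l] (by simp), pvSalt_cons]
    simp

-- the inner scan finds the index of the next delimiter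
theorem pvScan_eq (cl : List String) (j : Nat) :
    pvScan cl (cl.length : Int) (j : Int) = (j : Int) + (((cl.drop j).takeWhile pvNd).length : Int) := by
  by_cases h : j < cl.length
  · have hget : PySem.List.pyGetD cl (j : Int) "" = cl[j] := by
      rw [PySem.List.pyGetD_natCast]; exact List.getD_eq_getElem _ _ h
    have hdrop : cl.drop j = cl[j] :: cl.drop (j + 1) := List.drop_eq_getElem_cons h
    rw [pvScan, dif_pos (by exact_mod_cast h), hget]
    by_cases hd : PySem.Str.strip cl[j] = pvDELIM
    · rw [if_neg (by simpa using hd)]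
      have hnd : pvNd cl[j] = false := by simp [pvNd, hd]
      rw [hdrop]
      simp [hnd]
    · rw [if_pos (by simpa using hd)]
      have hnd : pvNd cl[j] = true := by simp [pvNd, hd]
      have ihs := pvScan_eq cl (j + 1)
      rw [hdrop]
      simp only [List.takeWhile_cons, hnd, if_true, List.length_cons]
      push_cast at ihs ⊢
      omega
  · rw [pvScan, dif_neg (by exact_mod_cast h)]
    rw [List.drop_eq_nil_of_le (by omega)]
    simp
termination_by (cl.length - j)
decreasing_by omega

-- the outer loop from index i produces the structural splitting of the suffix
theorem pvOuter_eq (cl : List String) (i : Nat) (hi : i ≤ cl.length) :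
    pvOuter cl (cl.length : Int) (i : Int) = pvSalt (cl.drop i) := by
  by_cases h : i < cl.length
  · have hdrop : cl.drop i = cl[i] :: cl.drop (i + 1) := List.drop_eq_getElem_cons h
    set t := ((cl.drop (i + 1)).takeWhile pvNd).length with ht
    have hscan : pvScan cl (cl.length : Int) ((i : Int) + 1) = ((i + 1 + t : Nat) : Int) := by
      have := pvScan_eq cl (i + 1)
      push_cast at this ⊢
      omega
    have htle : t ≤ (cl.drop (i + 1)).length :=
      (List.takeWhile_prefix (l := cl.drop (i + 1)) pvNd).length_le
    rw [List.length_drop] at htle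
    rw [pvOuter, dif_pos (by exact_mod_cast h)]
    simp only [hscan]
    have hpre : (cl.drop (i + 1)).takeWhile pvNd <+: cl.drop (i + 1) := List.takeWhile_prefix _
    have htake : (cl.drop (i + 1)).take t = (cl.drop (i + 1)).takeWhile pvNd :=
      (List.prefix_iff_eq_take.mp hpre).symm
    have hslice : PySem.List.slice cl (some (i : Int)) (some ((i + 1 + t : Nat) : Int))
        = cl[i] :: (cl.drop (i + 1)).takeWhile pvNd := by
      rw [PySem.List.slice_natCast, hdrop]
      rw [show i + 1 + t - i = t + 1 from by omega]
      rw [List.take_succ_cons, htake]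
    rw [hslice]
    have hrec : pvOuter cl (cl.length : Int) ((i + 1 + t : Nat) : Int) = pvSalt (cl.drop (i + 1 + t)) :=
      pvOuter_eq cl (i + 1 + t) (by omega)
    rw [hrec]
    have hdw : cl.drop (i + 1 + t) = (cl.drop (i + 1)).dropWhile pvNd := by
      have hsplit : (cl.drop (i + 1)).takeWhile pvNd ++ (cl.drop (i + 1)).dropWhile pvNd
          = cl.drop (i + 1) := List.takeWhile_append_dropWhile
      calc cl.drop (i + 1 + t)
          = (cl.drop (i + 1)).drop t := by rw [List.drop_drop, Nat.add_comm]
        _ = ((cl.drop (i + 1)).takeWhile pvNd ++ (cl.drop (i + 1)).dropWhile pvNd).drop t := by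
            rw [hsplit]
        _ = (cl.drop (i + 1)).dropWhile pvNd := by
            rw [ht, List.drop_left]
    rw [hdw, hdrop, pvSalt_cons]
  · have hie : i = cl.length := by omega
    rw [pvOuter, dif_neg (by exact_mod_cast h)]
    rw [hie, List.drop_length, pvSalt_nil]
termination_by (cl.length - i)
decreasing_by omega

theorem pvB_eq_salt (cl : List String) : split_frames_alt cl = pvSalt cl := by
  have h0 := pvOuter_eq cl 0 (by omega)
  simpa [split_frames_alt] using h0

-- ===== VERDICT (by name: the statement is the Claim_ definition above) =====
theorem split_frames_spec : Claim_equal_split_frames := by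
  intro cl _
  unfold Spec_split_frames
  rw [pvA_eq_salt, pvB_eq_salt]
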